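-- pv_equiv track=rewrite | github.com/player20/AI-agents | core/orchestrator.py | _extract_project_name
-- ===== SOURCE A (Python) =====
-- def _extract_project_name(meta_prompt_output: str) -> str:
--     """Extract project name from meta prompt output"""
--     # Look for "Project name:" or similar
--     lines = meta_prompt_output.split('\n')
--     for line in lines:
--         if 'project name' in line.lower():
--             # Extract name after colon
--             parts = line.split(':')
--             if len(parts) > 1:
--                 return parts[1].strip().strip('"\'')
--
--     # Fallback to first meaningful line
--     for line in lines:
--         line = line.strip()
--         if len(line) > 3 and not line.startswith('#'):
--             return line[:50]
--
--     return "generated_project"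
-- ===== SOURCE B (Python) =====
-- def _extract_project_name(meta_prompt_output: str) -> str:
--     """Single pass: try the project-name rule first, else record the first meaningful line."""
--     fallback = None
--     for line in meta_prompt_output.split('\n'):
--         if 'project name' in line.lower():
--             parts = line.split(':')
--             if len(parts) > 1:
--                 return parts[1].strip().strip('"\'')
--         if fallback is None:
--             s = line.strip()
--             if len(s) > 3 and not s.startswith('#'):
--                 fallback = s[:50]
--     return fallback if fallback is not None else "generated_project"
-- ===== Notes on version B (the rewrite author's own statement) =====
-- stated objective: alternative
-- what changed: Replaced A's two sequential scans over the lines (one for a project-name line, then a second from the top for the fallback) by a single loop that tests the project-name rule and records the first meaningful line as a fallback accumulator in the same pass.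
import Mathlib
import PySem

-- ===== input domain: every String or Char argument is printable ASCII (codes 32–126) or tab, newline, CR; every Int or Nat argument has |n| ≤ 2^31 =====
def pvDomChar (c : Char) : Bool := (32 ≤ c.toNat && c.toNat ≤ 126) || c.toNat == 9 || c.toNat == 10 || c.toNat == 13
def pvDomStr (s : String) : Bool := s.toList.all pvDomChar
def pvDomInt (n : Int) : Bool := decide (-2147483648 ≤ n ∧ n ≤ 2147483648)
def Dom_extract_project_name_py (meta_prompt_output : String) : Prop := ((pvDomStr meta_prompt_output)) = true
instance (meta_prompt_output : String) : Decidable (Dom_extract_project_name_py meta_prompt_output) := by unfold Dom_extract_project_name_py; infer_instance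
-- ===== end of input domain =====

-- B collapses A's two sequential scans into one loop with a fallback accumulator; same return value on every input.

-- ===== PORT A =====
-- 'project name' in line.lower() and, if the colon split has >1 parts, parts[1].strip().strip('"\'')
def pvPnHit? (line : String) : Option String :=
  if PySem.Str.isIn "project name" (PySem.Str.lower line) then
    let parts := (PySem.Str.split? line ":").getD []
    if parts.length > 1 then
      some (PySem.Str.stripChars (PySem.Str.strip (parts.getD 1 "")) "\"'")
    else none
  else none

-- first scan of A
def pvLoop1 : List String → Option String
  | [] => none
  | line :: rest =>
    match pvPnHit? line with
    | some r => some r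
    | none => pvLoop1 rest

-- second scan of A: first meaningful line, truncated to 50
def pvLoop2 : List String → Option String
  | [] => none
  | line :: rest =>
    let s := PySem.Str.strip line
    if PySem.Str.len s > 3 && !PySem.Str.startswith s "#" then
      some (PySem.Str.slice s none (some 50))
    else pvLoop2 rest

def extract_project_name_py (meta_prompt_output : String) : String :=
  let lines := (PySem.Str.split? meta_prompt_output "\n").getD []
  match pvLoop1 lines with
  | some r => r
  | none =>
    match pvLoop2 lines with
    | some r => r
    | none => "generated_project"

-- ===== PORT B =====
def pvAltLoop : List String → Option String → String
  | [], fallback => fallback.getD "generated_project"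
  | line :: rest, fallback =>
    match pvPnHit? line with
    | some r => r
    | none =>
      pvAltLoop rest
        (if fallback.isNone then
          let s := PySem.Str.strip line
          if PySem.Str.len s > 3 && !PySem.Str.startswith s "#" then
            some (PySem.Str.slice s none (some 50))
          else none
        else fallback)

def extract_project_name_py_alt (meta_prompt_output : String) : String :=
  pvAltLoop ((PySem.Str.split? meta_prompt_output "\n").getD []) none

-- ===== PRECONDITION & SPEC =====
def Spec_extract_project_name_py (meta_prompt_output : String) (out : String) : Prop := out = extract_project_name_py_alt meta_prompt_output
instance (meta_prompt_output : String) (out : String) : Decidable (Spec_extract_project_name_py meta_prompt_output out) := by unfold Spec_extract_project_name_py; infer_instance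

-- ===== CLAIM =====
def Claim_equal_extract_project_name_py : Prop := ∀ (meta_prompt_output : String), Dom_extract_project_name_py meta_prompt_output → Spec_extract_project_name_py meta_prompt_output (extract_project_name_py meta_prompt_output)

-- ===== LEMMAS AND PROOFS =====
-- Invariant: running B's loop with fallback fb computes A's two-scan result, where a
-- previously recorded fallback fb takes precedence over any fallback found in the rest.
theorem pvAltLoop_eq (lines : List String) (fb : Option String) :
    pvAltLoop lines fb =
      match pvLoop1 lines with
      | some r => r
      | none =>
        match fb with
        | some x => x
        | none =>
          match pvLoop2 lines with
          | some r => r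
          | none => "generated_project" := by
  induction lines generalizing fb with
  | nil => cases fb <;> simp [pvAltLoop, pvLoop1, pvLoop2, Option.getD]
  | cons line rest ih =>
    simp only [pvAltLoop, pvLoop1, pvLoop2]
    cases h : pvPnHit? line with
    | some r => simp
    | none =>
      rw [ih]
      cases fb with
      | some x => simp
      | none =>
        simp only [Option.isNone_none, if_true]
        split_ifs <;> simp

-- ===== VERDICT =====
theorem extract_project_name_py_spec : Claim_equal_extract_project_name_py := by
  intro s _
  unfold Spec_extract_project_name_py extract_project_name_py extract_project_name_py_alt
  rw [pvAltLoop_eq]
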